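-- pv_equiv track=rewrite | github.com/lseirina/leetcode | Hash_table/find_common_prefix.py | find_common_prefix
-- ===== SOURCE A (Python) =====
-- def find_common_prefix(A, B):
--     n = len(A)
--     set_A = set()
--     set_B = set()
--     common = set()
--     res = []
--
--     for i in range(n):
--         set_A.add(A[i])
--         set_B.add(B[i])
--         if A[i] in set_B:
--             common.add(A[i])
--         if B[i] in set_A:
--             common.add(B[i])
--
--         res.append(len(common))
--
--     return res
-- ===== SOURCE B (Python) =====
-- def find_common_prefix(A, B):
--     return [len(set(A[:i + 1]) & set(B[:i + 1])) for i in range(len(A))]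
-- ===== Notes on version B (the rewrite author's own statement) =====
-- stated objective: simpler
-- what changed: Replaces A's stateful loop (two growing sets plus an incrementally maintained 'common' set with two membership branches) by a one-line comprehension that recomputes len(set(A[:i+1]) & set(B[:i+1])) for each i.
import Mathlib
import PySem

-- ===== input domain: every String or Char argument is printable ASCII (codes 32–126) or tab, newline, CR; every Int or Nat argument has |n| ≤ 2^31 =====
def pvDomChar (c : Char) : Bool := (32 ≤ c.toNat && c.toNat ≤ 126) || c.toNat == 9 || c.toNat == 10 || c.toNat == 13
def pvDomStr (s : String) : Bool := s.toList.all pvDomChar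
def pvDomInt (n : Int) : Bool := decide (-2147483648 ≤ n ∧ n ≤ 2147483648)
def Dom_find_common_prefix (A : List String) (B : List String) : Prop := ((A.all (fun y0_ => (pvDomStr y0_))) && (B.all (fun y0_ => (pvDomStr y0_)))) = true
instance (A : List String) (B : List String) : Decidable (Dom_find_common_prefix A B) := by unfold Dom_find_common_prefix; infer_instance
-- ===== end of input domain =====

-- ===== PORT A =====
-- B drops A's stateful loop for a per-index recomputed prefix-set intersection (objective: simpler).
-- Python A raises IndexError at B[i] when B is shorter than A; Pre_ excludes exactly those inputs.
-- loop 'for i in range(n)' of A: fuel = remaining iterations, i = current index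
def fcpA_go (A B : List String) : Nat → Nat → PySem.Set String → PySem.Set String → PySem.Set String → List Int → List Int
  | 0, _, _, _, _, res => res
  | k+1, i, sA, sB, com, res =>
    let a := PySem.List.pyGetD A (i : Int) ""
    let b := PySem.List.pyGetD B (i : Int) ""
    let sA' := PySem.Set.add sA a
    let sB' := PySem.Set.add sB b
    let com' := if PySem.Set.contains sB' a then PySem.Set.add com a else com
    let com'' := if PySem.Set.contains sA' b then PySem.Set.add com' b else com'
    fcpA_go A B k (i+1) sA' sB' com'' (res ++ [PySem.Set.len com''])

def find_common_prefix (A : List String) (B : List String) : List Int :=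
  fcpA_go A B A.length 0 PySem.Set.empty PySem.Set.empty PySem.Set.empty []

-- ===== PORT B =====
-- '[len(set(A[:i+1]) & set(B[:i+1])) for i in range(len(A))]'
def find_common_prefix_alt (A : List String) (B : List String) : List Int :=
  (PySem.List.pyRange 0 (A.length : Int) 1).map (fun i =>
    PySem.Set.len (PySem.Set.inter
      (PySem.Set.ofList (PySem.List.slice A none (some (i + 1))))
      (PySem.Set.ofList (PySem.List.slice B none (some (i + 1))))))

-- ===== PRECONDITION & SPEC =====
-- Python A raises IndexError at B[i] when B is shorter than A; exactly those inputs are excluded.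
def Pre_find_common_prefix (A : List String) (B : List String) : Prop := A.length ≤ B.length
instance (A : List String) (B : List String) : Decidable (Pre_find_common_prefix A B) := by unfold Pre_find_common_prefix; infer_instance
def pvWitness_find_common_prefix : List String × List String := (["a", "b"], ["b", "c"])

def Spec_find_common_prefix (A : List String) (B : List String) (out : List Int) : Prop := out = find_common_prefix_alt A B
instance (A : List String) (B : List String) (out : List Int) : Decidable (Spec_find_common_prefix A B out) := by unfold Spec_find_common_prefix; infer_instance

-- ===== CLAIM (what is proved, stated in full; the proofs are below) =====
def Claim_equal_find_common_prefix : Prop := ∀ (A : List String) (B : List String), Dom_find_common_prefix A B → Pre_find_common_prefix A B → Spec_find_common_prefix A B (find_common_prefix A B)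

-- ===== LEMMAS AND PROOFS =====

-- the per-index value B computes, with a Nat index
def fcpVal (A B : List String) (i : Nat) : Int :=
  PySem.Set.len (PySem.Set.inter (PySem.Set.ofList (A.take (i+1))) (PySem.Set.ofList (B.take (i+1))))

-- two Nodup lists with the same members have the same Python length
theorem pv_len_eq_of_mem_iff {s t : List String}
    (hs : s.Nodup) (ht : t.Nodup) (h : ∀ x, x ∈ s ↔ x ∈ t) :
    PySem.Set.len s = PySem.Set.len t := by
  have hp : s.Perm t := (List.perm_ext_iff_of_nodup hs ht).2 h
  simp [PySem.Set.len, hp.length_eq]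

-- one step of A's two conditional adds keeps com = members of sA' ∩ sB'
theorem com_step_mem {com sA sB : List String} {a b : String}
    (hmem : ∀ x, x ∈ com ↔ x ∈ sA ∧ x ∈ sB) (x : String) :
    (x ∈ (if PySem.Set.contains (PySem.Set.add sA a) b then
            PySem.Set.add (if PySem.Set.contains (PySem.Set.add sB b) a then PySem.Set.add com a else com) b
          else if PySem.Set.contains (PySem.Set.add sB b) a then PySem.Set.add com a else com))
    ↔ (x ∈ PySem.Set.add sA a ∧ x ∈ PySem.Set.add sB b) := by
  split_ifs with h1 h2 h3 <;>
    simp only [PySem.Set.contains_iff, PySem.Set.mem_add, hmem] at * <;> aesop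

theorem com_step_nodup {com sA sB : List String} {a b : String} (hC : com.Nodup) :
    (if PySem.Set.contains (PySem.Set.add sA a) b then
       PySem.Set.add (if PySem.Set.contains (PySem.Set.add sB b) a then PySem.Set.add com a else com) b
     else if PySem.Set.contains (PySem.Set.add sB b) a then PySem.Set.add com a else com).Nodup := by
  split_ifs <;> first
    | exact PySem.Set.nodup_add _ _ (PySem.Set.nodup_add _ _ hC)
    | exact PySem.Set.nodup_add _ _ hC
    | exact hC

theorem ofList_append_singleton (xs : List String) (x : String) :
    PySem.Set.ofList (xs ++ [x]) = PySem.Set.add (PySem.Set.ofList xs) x := by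
  simp [PySem.Set.ofList_eq_foldl]

-- loop invariant: sA/sB are the prefix sets, com has exactly the members of their intersection
theorem fcpA_go_spec (A B : List String) (hlen : A.length ≤ B.length) (k : Nat) :
    ∀ (i : Nat) (com : PySem.Set String) (res : List Int),
    i + k = A.length → com.Nodup →
    (∀ x, x ∈ com ↔ x ∈ A.take i ∧ x ∈ B.take i) →
    fcpA_go A B k i (PySem.Set.ofList (A.take i)) (PySem.Set.ofList (B.take i)) com res
      = res ++ (List.range' i k).map (fcpVal A B) := by
  induction k with
  | zero => intro i com res _ _ _; simp [fcpA_go]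
  | succ k ih =>
    intro i com res hik hC hmem
    have hiA : i < A.length := by omega
    have hiB : i < B.length := by omega
    have ha : PySem.List.pyGetD A (i : Int) "" = A[i] := by
      simp [PySem.List.pyGetD_natCast, List.getD_eq_getElem?_getD, List.getElem?_eq_getElem hiA]
    have hb : PySem.List.pyGetD B (i : Int) "" = B[i] := by
      simp [PySem.List.pyGetD_natCast, List.getD_eq_getElem?_getD, List.getElem?_eq_getElem hiB]
    have htA : A.take (i+1) = A.take i ++ [A[i]] := by
      rw [List.take_add_one, List.getElem?_eq_getElem hiA]; rfl
    have htB : B.take (i+1) = B.take i ++ [B[i]] := by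
      rw [List.take_add_one, List.getElem?_eq_getElem hiB]; rfl
    have hsA : PySem.Set.add (PySem.Set.ofList (A.take i)) (PySem.List.pyGetD A (i : Int) "")
        = PySem.Set.ofList (A.take (i+1)) := by rw [ha, htA, ofList_append_singleton]
    have hsB : PySem.Set.add (PySem.Set.ofList (B.take i)) (PySem.List.pyGetD B (i : Int) "")
        = PySem.Set.ofList (B.take (i+1)) := by rw [hb, htB, ofList_append_singleton]
    simp only [fcpA_go]
    -- the appended value is fcpVal A B i
    have hmem' := fun x => com_step_mem (sA := PySem.Set.ofList (A.take i))
        (sB := PySem.Set.ofList (B.take i)) (a := PySem.List.pyGetD A (i : Int) "")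
        (b := PySem.List.pyGetD B (i : Int) "")
        (by intro x; rw [hmem x]; simp [PySem.Set.mem_ofList]) x
    have hnd := com_step_nodup (sA := PySem.Set.ofList (A.take i))
        (sB := PySem.Set.ofList (B.take i)) (a := PySem.List.pyGetD A (i : Int) "")
        (b := PySem.List.pyGetD B (i : Int) "") hC
    have hlenval : PySem.Set.len
        (if PySem.Set.contains (PySem.Set.add (PySem.Set.ofList (A.take i)) (PySem.List.pyGetD A (i : Int) ""))
              (PySem.List.pyGetD B (i : Int) "") then
           PySem.Set.add (if PySem.Set.contains (PySem.Set.add (PySem.Set.ofList (B.take i)) (PySem.List.pyGetD B (i : Int) ""))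
              (PySem.List.pyGetD A (i : Int) "") then PySem.Set.add com (PySem.List.pyGetD A (i : Int) "") else com)
              (PySem.List.pyGetD B (i : Int) "")
         else if PySem.Set.contains (PySem.Set.add (PySem.Set.ofList (B.take i)) (PySem.List.pyGetD B (i : Int) ""))
              (PySem.List.pyGetD A (i : Int) "") then PySem.Set.add com (PySem.List.pyGetD A (i : Int) "") else com)
        = fcpVal A B i := by
      apply pv_len_eq_of_mem_iff hnd
        (PySem.Set.nodup_inter _ _ (PySem.Set.nodup_ofList _))
      intro x
      rw [hmem' x, PySem.Set.mem_inter, hsA, hsB]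
    rw [hlenval, hsA, hsB]
    have hrec := ih (i+1) _ (res ++ [fcpVal A B i]) (by omega) hnd (by
      intro x
      rw [hmem' x, hsA, hsB]
      simp [PySem.Set.mem_ofList])
    rw [hsA, hsB] at hrec
    rw [hrec, List.range'_succ]
    simp

-- ===== VERDICT (by name: the statement is the Claim_ definition above) =====
theorem find_common_prefix_spec : Claim_equal_find_common_prefix := by
  intro A B _ hpre
  unfold Spec_find_common_prefix find_common_prefix find_common_prefix_alt
  have h0 := fcpA_go_spec A B hpre A.length 0 PySem.Set.empty [] (by omega)
      List.nodup_nil (by simp [PySem.Set.empty])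
  simp only [List.take_zero] at h0
  rw [show PySem.Set.ofList ([] : List String) = PySem.Set.empty from rfl] at h0
  rw [h0]
  rw [PySem.List.pyRange_one]
  simp only [List.map_map, List.nil_append, Int.sub_zero, Int.toNat_natCast,
    List.range_eq_range']
  apply List.map_congr_left
  intro k hk
  have hk' : k < A.length := by simpa [List.mem_range'] using hk
  simp only [Function.comp, fcpVal]
  rw [show ((0 : Int) + (k : Int) + 1) = ((k + 1 : Nat) : Int) by push_cast; ring]
  rw [PySem.List.slice_to_natCast, PySem.List.slice_to_natCast]
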